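-- pv_equiv track=rewrite | github.com/adusa1019/atcoder | ABC077/C.py | solve
-- ===== SOURCE A (Python) =====
-- def solve(string):
--     n, *abc = map(int, string.split())
--     a, b, c = map(sorted, [abc[i*n:(i+1)*n] for i in range(3)])
--     ai = ci = ans = 0
--     for _b in b:
--         while ai < n and a[ai] < _b:
--             ai += 1
--         while ci < n and c[ci] <= _b:
--             ci += 1
--         ans += ai * (n - ci)
--     return str(ans)
-- ===== SOURCE B (Python) =====
-- from bisect import bisect_left, bisect_right
--
--
-- def solve(string):
--     n, *abc = map(int, string.split())
--     a, b, c = (sorted(abc[i * n:(i + 1) * n]) for i in range(3))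
--     ans = sum(bisect_left(a, x) * (n - bisect_right(c, x)) for x in b)
--     return str(ans)
-- ===== Notes on version B (the rewrite author's own statement) =====
-- stated objective: idiomatic
-- what changed: A advances two monotone pointers (ai, ci) across sorted a and c while iterating b; B instead binary-searches (bisect_left into a, bisect_right into c) independently for each element of b and sums the products.
import Mathlib
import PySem

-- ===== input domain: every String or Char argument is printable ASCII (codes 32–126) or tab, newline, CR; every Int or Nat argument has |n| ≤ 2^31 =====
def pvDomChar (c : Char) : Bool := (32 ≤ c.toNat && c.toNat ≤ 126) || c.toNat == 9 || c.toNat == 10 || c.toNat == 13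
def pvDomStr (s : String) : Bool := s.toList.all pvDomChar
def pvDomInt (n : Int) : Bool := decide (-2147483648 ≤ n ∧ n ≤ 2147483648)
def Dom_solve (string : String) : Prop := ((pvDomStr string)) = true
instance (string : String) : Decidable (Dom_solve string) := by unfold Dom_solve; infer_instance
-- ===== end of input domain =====

-- B replaces A's two monotone pointers by a binary search (bisect_left / bisect_right)
-- into the sorted arrays for each element of b: more idiomatic, same O(n log n) cost.

-- ===== PORT A =====
-- A's inner `while ai < n and a[ai] < _b: ai += 1` (none = IndexError on a[ai])
def advLt (a : List Int) (n : Int) (x : Int) (ai : Nat) : Option Nat :=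
  if h : (ai : Int) < n then
    match a[ai]? with
    | none => none
    | some v => if v < x then advLt a n x (ai + 1) else some ai
  else some ai
termination_by (n - ai).toNat
decreasing_by omega

-- A's inner `while ci < n and c[ci] <= _b: ci += 1`
def advLe (cs : List Int) (n : Int) (x : Int) (ci : Nat) : Option Nat :=
  if h : (ci : Int) < n then
    match cs[ci]? with
    | none => none
    | some v => if v ≤ x then advLe cs n x (ci + 1) else some ci
  else some ci
termination_by (n - ci).toNat
decreasing_by omega

def solve (string : String) : String :=
  match (PySem.Str.split₀ string).mapM PySem.Int.ofStr? with
  | none => ""        -- int() raised ValueError (excluded by Pre_)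
  | some [] => ""     -- no token for n (excluded by Pre_)
  | some (n :: abc) =>
    let a := PySem.List.sorted (PySem.List.slice abc (some 0) (some n)) (fun x => x)
    let b := PySem.List.sorted (PySem.List.slice abc (some n) (some (2 * n))) (fun x => x)
    let c := PySem.List.sorted (PySem.List.slice abc (some (2 * n)) (some (3 * n))) (fun x => x)
    let r := b.foldl (fun st x =>
      match st with
      | none => none
      | some (ai, ci, ans) =>
        match advLt a n x ai, advLe c n x ci with
        | some ai', some ci' => some (ai', ci', ans + (ai' : Int) * (n - (ci' : Int)))
        | _, _ => none) (some (0, 0, (0 : Int)))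
    match r with
    | some (_, _, ans) => PySem.Int.toStr ans
    | none => ""      -- IndexError inside a while loop (excluded by Pre_)

-- ===== PORT B =====
def solve_alt (string : String) : String :=
  match (PySem.Str.split₀ string).mapM PySem.Int.ofStr? with
  | none => ""
  | some [] => ""
  | some (n :: abc) =>
    let a := PySem.List.sorted (PySem.List.slice abc (some 0) (some n)) (fun x => x)
    let b := PySem.List.sorted (PySem.List.slice abc (some n) (some (2 * n))) (fun x => x)
    let c := PySem.List.sorted (PySem.List.slice abc (some (2 * n)) (some (3 * n))) (fun x => x)
    let ans := (b.map (fun x =>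
      (PySem.List.bisectLeft a x : Int) * (n - (PySem.List.bisectRight c x : Int)))).sum
    PySem.Int.toStr ans

-- ===== PRECONDITION & SPEC =====
-- Pre_ excludes exactly the inputs on which A raises: a token that is not an int /
-- no token at all (ValueError), and malformed shapes (fewer than 3n numbers after n)
-- on which A's c-pointer runs off the short c slice (IndexError).
def preCheck (string : String) : Bool :=
  match (PySem.Str.split₀ string).mapM PySem.Int.ofStr? with
  | none => false
  | some [] => false
  | some (n :: abc) =>
    let b := PySem.List.slice abc (some n) (some (2 * n))
    let c := PySem.List.slice abc (some (2 * n)) (some (3 * n))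
    b.isEmpty || !(decide ((c.length : Int) < n) && c.all (fun z => b.any (fun y => z ≤ y)))

def Pre_solve (string : String) : Prop := preCheck string = true
instance (string : String) : Decidable (Pre_solve string) := by unfold Pre_solve; infer_instance

def pvWitness_solve : String := "2 1 4 2 5 3 6"

def Spec_solve (string : String) (out : String) : Prop := out = solve_alt string
instance (string : String) (out : String) : Decidable (Spec_solve string out) := by unfold Spec_solve; infer_instance

-- ===== CLAIM (what is proved, stated in full; the proofs are below) =====
def Claim_equal_solve : Prop := ∀ (string : String), Dom_solve string → Pre_solve string → Spec_solve string (solve string)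

-- ===== LEMMAS AND PROOFS =====

-- On a sorted list, an index with all-smaller prefix and a not-smaller current
-- element is exactly bisect_left.
lemma bisectLeft_eq_of (a : List Int) (ha : a.Pairwise (· ≤ ·)) (x : Int) (ai : Nat)
    (hai : ai ≤ a.length)
    (hlt : ∀ j (hj : j < a.length), j < ai → a[j] < x)
    (hge : ∀ h : ai < a.length, x ≤ a[ai]) :
    PySem.List.bisectLeft a x = ai := by
  obtain ⟨h1, h2, h3⟩ := PySem.List.bisectLeft_spec a x ha
  by_contra hne
  rcases Nat.lt_or_ge (PySem.List.bisectLeft a x) ai with hc | hc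
  · have hx1 := h3 _ (by omega) (le_refl _)
    have hx2 := hlt _ (by omega) hc
    omega
  · have hc2 : ai < PySem.List.bisectLeft a x := by omega
    have hai2 : ai < a.length := by omega
    have hx1 := h2 ai hai2 hc2
    have hx2 := hge hai2
    omega

lemma bisectRight_eq_of (cs : List Int) (hc : cs.Pairwise (· ≤ ·)) (x : Int) (ci : Nat)
    (hci : ci ≤ cs.length)
    (hle : ∀ j (hj : j < cs.length), j < ci → cs[j] ≤ x)
    (hgt : ∀ h : ci < cs.length, x < cs[ci]) :
    PySem.List.bisectRight cs x = ci := by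
  obtain ⟨h1, h2, h3⟩ := PySem.List.bisectRight_spec cs x hc
  by_contra hne
  rcases Nat.lt_or_ge (PySem.List.bisectRight cs x) ci with hcase | hcase
  · have hx1 := h3 _ (by omega) (le_refl _)
    have hx2 := hle _ (by omega) hcase
    omega
  · have hc2 : ci < PySem.List.bisectRight cs x := by omega
    have hci2 : ci < cs.length := by omega
    have hx1 := h2 ci hci2 hc2
    have hx2 := hgt hci2
    omega

-- On a sorted list of length n, A's first pointer loop lands exactly on bisect_left.
lemma advLt_eq (a : List Int) (ha : a.Pairwise (· ≤ ·)) (n : Int) (hn : n = (a.length : Int))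
    (x : Int) (k : Nat) : ∀ ai : Nat, a.length - ai ≤ k → ai ≤ a.length →
    (∀ j (hj : j < a.length), j < ai → a[j] < x) →
    advLt a n x ai = some (PySem.List.bisectLeft a x) := by
  induction k with
  | zero =>
    intro ai hk hai hinv
    have hlen : ai = a.length := by omega
    rw [advLt, dif_neg (by omega : ¬ ((ai : Int) < n))]
    rw [bisectLeft_eq_of a ha x ai hai hinv (fun h => absurd h (by omega))]
  | succ k ih =>
    intro ai hk hai hinv
    rw [advLt]
    by_cases hg : (ai : Int) < n
    · rw [dif_pos hg]
      have hail : ai < a.length := by omega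
      rw [List.getElem?_eq_getElem hail]
      dsimp only
      by_cases hv : a[ai] < x
      · rw [if_pos hv]
        exact ih (ai + 1) (by omega) (by omega)
          (fun j hj hja => by
            rcases Nat.lt_or_ge j ai with h' | h'
            · exact hinv j hj h'
            · have : j = ai := by omega
              subst this; exact hv)
      · rw [if_neg hv]
        rw [bisectLeft_eq_of a ha x ai hai hinv (fun _ => le_of_not_gt hv)]
    · rw [dif_neg hg]
      rw [bisectLeft_eq_of a ha x ai hai hinv (fun h => absurd h (by omega))]

-- On a sorted list of length ≤ n, A's second pointer loop lands exactly on
-- bisect_right, provided some element exceeds x whenever the list is short.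
lemma advLe_eq (cs : List Int) (hc : cs.Pairwise (· ≤ ·)) (n : Int) (hn : (cs.length : Int) ≤ n)
    (x : Int) (hcond : (cs.length : Int) = n ∨ ∃ z ∈ cs, x < z) (k : Nat) :
    ∀ ci : Nat, n.toNat - ci ≤ k → ci ≤ cs.length →
    (∀ j (hj : j < cs.length), j < ci → cs[j] ≤ x) →
    advLe cs n x ci = some (PySem.List.bisectRight cs x) := by
  induction k with
  | zero =>
    intro ci hk hci hinv
    have hg : ¬ ((ci : Int) < n) := by omega
    rw [advLe, dif_neg hg]
    rw [bisectRight_eq_of cs hc x ci hci hinv (fun h => absurd h (by omega))]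
  | succ k ih =>
    intro ci hk hci hinv
    rw [advLe]
    by_cases hg : (ci : Int) < n
    · rw [dif_pos hg]
      by_cases hcil : ci < cs.length
      · rw [List.getElem?_eq_getElem hcil]
        dsimp only
        by_cases hv : cs[ci] ≤ x
        · rw [if_pos hv]
          exact ih (ci + 1) (by omega) (by omega)
            (fun j hj hjc => by
              rcases Nat.lt_or_ge j ci with h' | h'
              · exact hinv j hj h'
              · have : j = ci := by omega
                subst this; exact hv)
        · rw [if_neg hv]
          rw [bisectRight_eq_of cs hc x ci hci hinv (fun _ => lt_of_not_ge hv)]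
      · -- ci = cs.length < n : Python would raise; excluded by hcond
        exfalso
        have hcl : ci = cs.length := by omega
        rcases hcond with hcl2 | ⟨z, hz, hxz⟩
        · omega
        · obtain ⟨j, hj, rfl⟩ := List.mem_iff_getElem.mp hz
          have := hinv j hj (by omega)
          omega
    · rw [dif_neg hg]
      rw [bisectRight_eq_of cs hc x ci hci hinv (fun h => absurd h (by omega))]

-- A's fold over b accumulates exactly B's per-element products.
lemma fold_eq (a cs : List Int) (n : Int) (ha : a.Pairwise (· ≤ ·)) (hc : cs.Pairwise (· ≤ ·))
    (hla : n = (a.length : Int)) (hlc : (cs.length : Int) ≤ n)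
    (b : List Int) (hb : b.Pairwise (· ≤ ·))
    (hnr : ∀ x ∈ b, (cs.length : Int) = n ∨ ∃ z ∈ cs, x < z)
    (ai ci : Nat) (ans : Int) (hai : ai ≤ a.length)
    (hai2 : ∀ x ∈ b, ∀ j (hj : j < a.length), j < ai → a[j] < x)
    (hci : ci ≤ cs.length)
    (hci2 : ∀ x ∈ b, ∀ j (hj : j < cs.length), j < ci → cs[j] ≤ x) :
    ∃ ai' ci', b.foldl (fun st x =>
      match st with
      | none => none
      | some (ai, ci, ans) =>
        match advLt a n x ai, advLe cs n x ci with
        | some ai', some ci' => some (ai', ci', ans + (ai' : Int) * (n - (ci' : Int)))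
        | _, _ => none) (some (ai, ci, ans))
      = some (ai', ci', ans + (b.map (fun x =>
          (PySem.List.bisectLeft a x : Int) * (n - (PySem.List.bisectRight cs x : Int)))).sum) := by
  induction b generalizing ai ci ans with
  | nil => exact ⟨ai, ci, by simp⟩
  | cons x t ihb =>
    rw [List.pairwise_cons] at hb
    obtain ⟨hxt, htp⟩ := hb
    have hA := advLt_eq a ha n hla x a.length ai (by omega) hai
      (hai2 x (List.mem_cons_self))
    have hC := advLe_eq cs hc n hlc x (hnr x (List.mem_cons_self)) n.toNat ci
      (by omega) hci (hci2 x (List.mem_cons_self))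
    obtain ⟨hbl, hbl2, hbl3⟩ := PySem.List.bisectLeft_spec a x ha
    obtain ⟨hbr, hbr2, hbr3⟩ := PySem.List.bisectRight_spec cs x hc
    obtain ⟨ai', ci', heq⟩ := ihb htp
      (fun y hy => hnr y (List.mem_cons_of_mem x hy))
      (PySem.List.bisectLeft a x) (PySem.List.bisectRight cs x)
      (ans + (PySem.List.bisectLeft a x : Int) * (n - (PySem.List.bisectRight cs x : Int)))
      hbl
      (fun y hy j hj hja =>
        lt_of_lt_of_le (hbl2 j hj hja) (hxt y hy))
      hbr
      (fun y hy j hj hjc =>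
        le_trans (hbr2 j hj hjc) (hxt y hy))
    refine ⟨ai', ci', ?_⟩
    rw [List.foldl_cons]
    simp only [hA, hC]
    rw [heq, List.map_cons, List.sum_cons, ← add_assoc]

-- ===== VERDICT (by name: the statement is the Claim_ definition above) =====
theorem solve_spec : Claim_equal_solve := by
  intro s _ hpre
  unfold Spec_solve solve solve_alt
  unfold Pre_solve preCheck at hpre
  cases hparse : (PySem.Str.split₀ s).mapM PySem.Int.ofStr? with
  | none => rw [hparse] at hpre
  | some l =>
    cases l with
    | nil => rw [hparse] at hpre
    | cons n abc =>
      rw [hparse] at hpre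
      dsimp only at hpre ⊢
      simp only [Bool.or_eq_true, List.isEmpty_iff, Bool.not_eq_true', Bool.and_eq_false_iff,
        decide_eq_false_iff_not, List.all_eq_false, Bool.not_eq_true] at hpre
      by_cases hbe : PySem.List.slice abc (some n) (some (2 * n)) = []
      · have h0 : PySem.List.sorted ([] : List Int) (fun x : Int => x) = [] := rfl
        rw [hbe, h0]
        simp only [List.foldl_nil, List.map_nil, List.sum_nil]
      · have hlb : 0 < (PySem.List.slice abc (some n) (some (2 * n))).length :=
          List.length_pos_iff.mpr hbe
        have hlb2 := PySem.List.length_slice abc n (2 * n)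
        have hfacts : 1 ≤ n ∧ n < (abc.length : Int) := by
          rw [hlb2] at hlb
          simp only [PySem.List.clampIdx] at hlb
          split_ifs at hlb <;> omega
        have ha0 : PySem.List.slice abc (some 0) (some n) = abc.take n.toNat := by
          rw [PySem.List.slice_zero_start]; exact PySem.List.slice_to _ (by omega)
        have hla : n = ((PySem.List.sorted (PySem.List.slice abc (some 0) (some n))
            (fun x : Int => x)).length : Int) := by
          rw [PySem.List.length_sorted, ha0, List.length_take]; omega
        have hslc := PySem.List.length_slice abc (2 * n) (3 * n)
        have hsc := PySem.List.length_sorted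
          (PySem.List.slice abc (some (2 * n)) (some (3 * n))) (fun x : Int => x) false
        have hlc : (((PySem.List.sorted (PySem.List.slice abc (some (2 * n)) (some (3 * n)))
            (fun x : Int => x)).length : Int)) ≤ n := by
          rw [hsc, hslc]
          simp only [PySem.List.clampIdx]
          split_ifs <;> omega
        have hnr : ∀ x ∈ PySem.List.sorted (PySem.List.slice abc (some n) (some (2 * n)))
            (fun x : Int => x),
            (((PySem.List.sorted (PySem.List.slice abc (some (2 * n)) (some (3 * n)))
              (fun x : Int => x)).length : Int)) = n ∨
            ∃ z ∈ PySem.List.sorted (PySem.List.slice abc (some (2 * n)) (some (3 * n)))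
              (fun x : Int => x), x < z := by
          intro x hx
          by_cases hceq : (((PySem.List.sorted (PySem.List.slice abc (some (2 * n)) (some (3 * n)))
              (fun x : Int => x)).length : Int)) = n
          · exact Or.inl hceq
          · rcases hpre with h | h | ⟨z, hz, hzb⟩
            · exact absurd h hbe
            · exact Or.inl (by omega)
            · refine Or.inr ⟨z, (PySem.List.mem_sorted _ _ _ _).mpr hz, ?_⟩
              have hxs := (PySem.List.mem_sorted _ _ _ _).mp hx
              have h2 := List.any_eq_false.mp hzb x hxs
              simp only [decide_eq_true_eq] at h2
              exact lt_of_not_ge h2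
        obtain ⟨ai', ci', heq⟩ := fold_eq
          (PySem.List.sorted (PySem.List.slice abc (some 0) (some n)) (fun x => x))
          (PySem.List.sorted (PySem.List.slice abc (some (2 * n)) (some (3 * n))) (fun x => x))
          n
          (PySem.List.sorted_pairwise _ _)
          (PySem.List.sorted_pairwise _ _)
          hla hlc
          (PySem.List.sorted (PySem.List.slice abc (some n) (some (2 * n))) (fun x => x))
          (PySem.List.sorted_pairwise _ _)
          hnr 0 0 0 (Nat.zero_le _)
          (fun _ _ _ _ h => absurd h (by omega))
          (Nat.zero_le _)
          (fun _ _ _ _ h => absurd h (by omega))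
        rw [heq]
        dsimp only
        rw [zero_add]
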